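-- pv_equiv track=rewrite | github.com/qiqingh/contest_AE_final | A2_constraintdriven_toolchain/toolchain2_IE_collection/intra-IE/code/00_extract_IE_id.py | parse_path_segments
-- ===== SOURCE A (Python) =====
-- def parse_path_segments(path):
--     """
--     Parse the path and return a list of all segments
--     """
--     segments = []
--     current_segment = ""
--     in_bracket = False
--
--     for char in path:
--         if char == '[':
--             in_bracket = True
--             current_segment += char
--         elif char == ']':
--             in_bracket = False
--             current_segment += char
--         elif char == '.' and not in_bracket:
--             if current_segment:
--                 segments.append(current_segment)
--                 current_segment = ""
--         else:
--             current_segment += char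
--
--     if current_segment:
--         segments.append(current_segment)
--
--     return segments
-- ===== SOURCE B (Python) =====
-- def parse_path_segments(path):
--     """
--     Parse the path and return a list of all segments
--     """
--     # pass 1: record the index of every dot seen outside brackets
--     cuts = []
--     in_bracket = False
--     for i, ch in enumerate(path):
--         if ch == '[':
--             in_bracket = True
--         elif ch == ']':
--             in_bracket = False
--         elif ch == '.' and not in_bracket:
--             cuts.append(i)
--     # pass 2: slice between consecutive boundaries, keeping non-empty slices
--     segments = []
--     prev = 0
--     for c in cuts + [len(path)]:
--         seg = path[prev:c]
--         if seg:
--             segments.append(seg)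
--         prev = c + 1
--     return segments
-- ===== Notes on version B (the rewrite author's own statement) =====
-- stated objective: alternative
-- what changed: Replaced A's single pass that grows a character buffer per segment with a two-pass scheme: first collect the indices of unbracketed dots, then build the result by slicing the path between consecutive boundaries, keeping non-empty slices.
import Mathlib
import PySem

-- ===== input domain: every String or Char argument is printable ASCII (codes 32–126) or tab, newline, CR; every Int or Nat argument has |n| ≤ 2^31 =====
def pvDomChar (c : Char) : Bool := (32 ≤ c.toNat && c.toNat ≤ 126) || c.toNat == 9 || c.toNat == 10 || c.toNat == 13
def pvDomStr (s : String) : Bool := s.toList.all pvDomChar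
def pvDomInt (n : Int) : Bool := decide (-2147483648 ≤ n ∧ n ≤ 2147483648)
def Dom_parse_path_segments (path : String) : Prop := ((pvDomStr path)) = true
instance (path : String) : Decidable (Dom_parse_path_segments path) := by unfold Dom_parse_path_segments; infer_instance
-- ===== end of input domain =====

-- B replaces A's buffer-accumulating scan with collect-cut-indices-then-slice (alternative decomposition, same cost).

-- ===== PORT A =====
-- A's loop: state (segments, current_segment, in_bracket); current_segment kept as List Char.
def pvLoopA : List Char → Bool → List String → List Char → List String
  | [], _, segs, cur => if cur ≠ [] then segs ++ [String.ofList cur] else segs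
  | c :: cs, b, segs, cur =>
    if c = '[' then pvLoopA cs true segs (cur ++ [c])
    else if c = ']' then pvLoopA cs false segs (cur ++ [c])
    else if c = '.' ∧ b = false then
      (if cur ≠ [] then pvLoopA cs b (segs ++ [String.ofList cur]) [] else pvLoopA cs b segs cur)
    else pvLoopA cs b segs (cur ++ [c])

def parse_path_segments (path : String) : List String :=
  pvLoopA path.toList false [] []

-- ===== PORT B =====
-- pass 1 of Source B: indices of unbracketed dots (i is the enumerate index)
def pvCuts : List Char → Int → Bool → List Int
  | [], _, _ => []
  | c :: cs, i, b =>
    if c = '[' then pvCuts cs (i+1) true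
    else if c = ']' then pvCuts cs (i+1) false
    else if c = '.' ∧ b = false then i :: pvCuts cs (i+1) b
    else pvCuts cs (i+1) b

-- pass 2 of Source B: slice between consecutive boundaries, keep non-empty slices
def pvSegs : List Int → Int → List Char → List String
  | [], _, _ => []
  | c :: rest, prev, chars =>
    (if PySem.List.slice chars (some prev) (some c) ≠ [] then
       [String.ofList (PySem.List.slice chars (some prev) (some c))] else []) ++
    pvSegs rest (c + 1) chars

def parse_path_segments_alt (path : String) : List String :=
  pvSegs (pvCuts path.toList 0 false ++ [(path.toList.length : Int)]) 0 path.toList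

-- ===== PRECONDITION & SPEC =====
def Spec_parse_path_segments (path : String) (out : List String) : Prop := out = parse_path_segments_alt path
instance (path : String) (out : List String) : Decidable (Spec_parse_path_segments path out) := by unfold Spec_parse_path_segments; infer_instance

-- ===== CLAIM (what is proved, stated in full; the proofs are below) =====
def Claim_equal_parse_path_segments : Prop := ∀ (path : String), Dom_parse_path_segments path → Spec_parse_path_segments path (parse_path_segments path)

-- ===== LEMMAS AND PROOFS =====

-- loop invariant: running A's loop on the suffix whole.drop i with pending buffer whole[p:i]
-- produces exactly B's slices between the remaining cut boundaries.
theorem pvMain (whole : List Char) : ∀ (t : List Char) (i p : Nat) (b : Bool) (segs : List String),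
    whole.drop i = t → i + t.length = whole.length → p ≤ i →
    pvLoopA t b segs ((whole.drop p).take (i - p)) =
      segs ++ pvSegs (pvCuts t (i : Int) b ++ [(whole.length : Int)]) (p : Int) whole := by
  intro t
  induction t with
  | nil =>
    intro i p b segs hdrop hlen hp
    simp at hlen
    subst hlen
    have hseg := PySem.List.slice_natCast whole p whole.length
    simp only [pvLoopA, pvCuts, pvSegs, List.nil_append, hseg]
    split <;> simp
  | cons c cs ih =>
    intro i p b segs hdrop hlen hp
    have hi : i < whole.length := by simp at hlen; omega
    have hgi : whole[i]? = some c := by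
      have : (whole.drop i)[0]? = some c := by rw [hdrop]; rfl
      simpa using this
    have hdrop' : whole.drop (i + 1) = cs := by
      rw [← List.tail_drop, hdrop]; rfl
    have hlen' : (i + 1) + cs.length = whole.length := by simp at hlen ⊢; omega
    have hcur : ((whole.drop p).take (i - p)) ++ [c] = (whole.drop p).take (i + 1 - p) := by
      have h1 : i + 1 - p = (i - p) + 1 := by omega
      rw [h1, List.take_add_one]
      have : (whole.drop p)[i - p]? = some c := by
        rw [List.getElem?_drop]
        have : p + (i - p) = i := by omega
        rw [this, hgi]
      simp [this]
    have hcast : ((i : Int) + 1) = ((i + 1 : Nat) : Int) := by push_cast; ring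
    simp only [pvLoopA, pvCuts]
    split
    · -- '['
      rw [hcur, ih (i+1) p true segs hdrop' hlen' (by omega), hcast]
    · split
      · -- ']'
        rw [hcur, ih (i+1) p false segs hdrop' hlen' (by omega), hcast]
      · split
        · -- unbracketed dot: boundary i
          have hseg : PySem.List.slice whole (some (p : Int)) (some (i : Int)) =
              (whole.drop p).take (i - p) := PySem.List.slice_natCast whole p i
          rw [List.cons_append]
          simp only [pvSegs, hseg]
          split
          · -- pending buffer non-empty: emit it
            rename_i hne
            have := ih (i+1) (i+1) b (segs ++ [String.ofList ((whole.drop p).take (i - p))])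
              hdrop' hlen' (by omega)
            simp only [Nat.sub_self, List.take_zero] at this
            rw [this, hcast]
            simp
          · -- pending buffer empty: nothing to emit
            rename_i hne
            simp only [not_not] at hne
            have := ih (i+1) (i+1) b segs hdrop' hlen' (by omega)
            simp only [Nat.sub_self, List.take_zero] at this
            rw [hne, this, hcast]
            simp
        · -- ordinary character
          rw [hcur, ih (i+1) p b segs hdrop' hlen' (by omega), hcast]

-- ===== VERDICT (by name: the statement is the Claim_ definition above) =====
theorem parse_path_segments_spec : Claim_equal_parse_path_segments := by
  intro path _
  unfold Spec_parse_path_segments parse_path_segments parse_path_segments_alt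
  have := pvMain path.toList path.toList 0 0 false [] (by simp) (by simp) (by omega)
  simpa using this
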